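-- pv_equiv track=rewrite | github.com/AhmedAshraf982/PyBoolSearch | src/Query.py | intersect_two_pos_proximty
-- ===== SOURCE A (Python) =====
-- def intersect_two_pos_proximty(lst1, lst2, dist):
--     """
--     search and merge those query which present with some distance
--     :param lst1:
--     :param lst2:
--     :param dist:
--     :return:
--     """
--     l1 = len(lst1)
--     l2 = len(lst2)
--     dist = int(dist)+1
--     i = 0
--     j = 0
--     answer = []
--     while i < l1 and j < l2:
--         key1 = list(lst1[i].keys())[0]
--         key2 = list(lst2[j].keys())[0]
--         if key1 == key2:
--             value1 = list(lst1[i].values())[0]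
--             value2 = list(lst2[j].values())[0]
--             for val1 in value1:
--                 for val2 in value2:
--                     if abs(val1 - val2) <= dist:
--                         if key1 not in answer:
--                             answer.append(key1)
--             i = i + 1
--             j = j + 1
--         elif key1 > key2:
--             j = j + 1
--         else:
--             i = i + 1
--     return answer
-- ===== SOURCE B (Python) =====
-- def _close(p1, p2, d):
--     # two-pointer sweep over the sorted position lists: is there a pair within d?
--     xs = sorted(p1)
--     ys = sorted(p2)
--     i = 0
--     j = 0
--     while i < len(xs) and j < len(ys):
--         if abs(xs[i] - ys[j]) <= d:
--             return True
--         if xs[i] < ys[j]: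
--             i += 1
--         else:
--             j += 1
--     return False
--
--
-- def _merge(lst1, lst2):
--     # recursive merge of the two key-sorted postings streams:
--     # the matched (key, positions1, positions2) triples, in order
--     if not lst1 or not lst2:
--         return []
--     k1 = list(lst1[0].keys())[0]
--     k2 = list(lst2[0].keys())[0]
--     if k1 == k2:
--         return [(k1, list(lst1[0].values())[0], list(lst2[0].values())[0])] \
--             + _merge(lst1[1:], lst2[1:])
--     if k1 > k2:
--         return _merge(lst1, lst2[1:])
--     return _merge(lst1[1:], lst2)
--
--
-- def intersect_two_pos_proximty(lst1, lst2, dist):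
--     d = int(dist) + 1
--     answer = []
--     for k, v1, v2 in _merge(lst1, lst2):
--         if k not in answer and _close(v1, v2, d):
--             answer.append(k)
--     return answer
-- ===== Notes on version B (the rewrite author's own statement) =====
-- stated objective: alternative
-- what changed: A's single interleaved merge loop with a quadratic nested position scan is decomposed into stages: a recursive merge that first collects the matched (key, positions1, positions2) triples, then one dedup-filter pass that tests closeness by a two-pointer sweep over the sorted position lists with early exit on the first pair within distance.
-- outside the precondition, e.g. on intersect_two_pos_proximty([{1: [0]}], [{2: [0]}, {}], 0): A returns [], B returns []
import Mathlib
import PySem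

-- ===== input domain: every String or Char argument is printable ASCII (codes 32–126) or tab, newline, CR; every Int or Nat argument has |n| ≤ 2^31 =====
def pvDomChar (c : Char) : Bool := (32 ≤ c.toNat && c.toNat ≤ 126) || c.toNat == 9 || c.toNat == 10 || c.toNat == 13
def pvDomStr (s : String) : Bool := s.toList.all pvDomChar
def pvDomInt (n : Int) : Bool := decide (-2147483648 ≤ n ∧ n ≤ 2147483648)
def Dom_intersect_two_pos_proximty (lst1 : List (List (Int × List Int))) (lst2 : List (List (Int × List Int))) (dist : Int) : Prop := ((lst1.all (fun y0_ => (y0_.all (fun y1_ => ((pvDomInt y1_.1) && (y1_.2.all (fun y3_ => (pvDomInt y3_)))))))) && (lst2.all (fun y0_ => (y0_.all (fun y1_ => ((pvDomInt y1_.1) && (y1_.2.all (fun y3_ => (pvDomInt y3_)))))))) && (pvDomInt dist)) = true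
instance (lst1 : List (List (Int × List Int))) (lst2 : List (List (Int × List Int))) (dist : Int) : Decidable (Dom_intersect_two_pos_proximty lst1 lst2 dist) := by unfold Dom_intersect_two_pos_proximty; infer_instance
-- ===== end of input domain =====

-- B splits A's interleaved merge-and-scan loop into stages: a recursive merge collecting matched
-- (key, positions, positions) triples, then one dedup-filter pass using a sorted two-pointer closeness test.
-- ===== PORT A =====
def pvInnerA (k : Int) (d : Int) (v1 v2 : List Int) (ans : List Int) : List Int :=
  v1.foldl (fun a x =>
    v2.foldl (fun a y =>
      if |x - y| ≤ d then (if k ∉ a then a ++ [k] else a) else a) a) ans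

def pvLoopA : List (List (Int × List Int)) → List (List (Int × List Int)) → Int → List Int → List Int
  | [], _, _, ans => ans
  | _ :: _, [], _, ans => ans
  | d1 :: r1, d2 :: r2, d, ans =>
    match d1, d2 with
    | (k1, v1) :: _, (k2, v2) :: _ =>
      if k1 = k2 then pvLoopA r1 r2 d (pvInnerA k1 d v1 v2 ans)
      else if k1 > k2 then pvLoopA (d1 :: r1) r2 d ans
      else pvLoopA r1 (d2 :: r2) d ans
    | _, _ => ans  -- Python raises IndexError here (empty dict); excluded by Pre_
termination_by l1 l2 => l1.length + l2.length

def intersect_two_pos_proximty (lst1 : List (List (Int × List Int))) (lst2 : List (List (Int × List Int))) (dist : Int) : List Int :=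
  pvLoopA lst1 lst2 (dist + 1) []

-- ===== PORT B =====
def pvTwoPtr : List Int → List Int → Int → Bool
  | x :: xs, y :: ys, d =>
    if |x - y| ≤ d then true
    else if x < y then pvTwoPtr xs (y :: ys) d
    else pvTwoPtr (x :: xs) ys d
  | _, _, _ => false
termination_by xs ys => xs.length + ys.length

def pvClose (p1 p2 : List Int) (d : Int) : Bool :=
  pvTwoPtr (PySem.List.sorted p1 (fun x => x) false) (PySem.List.sorted p2 (fun x => x) false) d

-- recursive merge of the two key-sorted streams: matched triples in order
def pvMerge : List (List (Int × List Int)) → List (List (Int × List Int)) → List (Int × List Int × List Int)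
  | [], _ => []
  | _ :: _, [] => []
  | d1 :: r1, d2 :: r2 =>
    match d1, d2 with
    | (k1, v1) :: _, (k2, v2) :: _ =>
      if k1 = k2 then (k1, v1, v2) :: pvMerge r1 r2
      else if k1 > k2 then pvMerge (d1 :: r1) r2
      else pvMerge r1 (d2 :: r2)
    | _, _ => []  -- unreachable under Pre_ (B's Python raises IndexError here too)
termination_by l1 l2 => l1.length + l2.length

def intersect_two_pos_proximty_alt (lst1 : List (List (Int × List Int))) (lst2 : List (List (Int × List Int))) (dist : Int) : List Int :=
  (pvMerge lst1 lst2).foldl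
    (fun answer t =>
      if t.1 ∉ answer ∧ pvClose t.2.1 t.2.2 (dist + 1) then answer ++ [t.1] else answer) []

-- ===== PRECONDITION & SPEC =====
-- Pre_ excludes inputs containing an empty inner dict, on which A raises IndexError once the
-- merge reaches it (for a few unreached empty dicts both programs still return, see cites).
def Pre_intersect_two_pos_proximty (lst1 : List (List (Int × List Int))) (lst2 : List (List (Int × List Int))) (dist : Int) : Prop :=
  lst1 = [] ∨ lst2 = [] ∨ ((∀ d ∈ lst1, 1 ≤ d.length) ∧ (∀ d ∈ lst2, 1 ≤ d.length))
instance (lst1 : List (List (Int × List Int))) (lst2 : List (List (Int × List Int))) (dist : Int) : Decidable (Pre_intersect_two_pos_proximty lst1 lst2 dist) := by unfold Pre_intersect_two_pos_proximty; infer_instance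

def pvWitness_intersect_two_pos_proximty : (List (List (Int × List Int))) × (List (List (Int × List Int))) × Int :=
  ([[(1, [0, 7])]], [[(1, [3])], [(2, [5])]], 2)

def Spec_intersect_two_pos_proximty (lst1 : List (List (Int × List Int))) (lst2 : List (List (Int × List Int))) (dist : Int) (out : List Int) : Prop := out = intersect_two_pos_proximty_alt lst1 lst2 dist
instance (lst1 : List (List (Int × List Int))) (lst2 : List (List (Int × List Int))) (dist : Int) (out : List Int) : Decidable (Spec_intersect_two_pos_proximty lst1 lst2 dist out) := by unfold Spec_intersect_two_pos_proximty; infer_instance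

-- ===== CLAIM (what is proved, stated in full; the proofs are below) =====
def Claim_equal_intersect_two_pos_proximty : Prop := ∀ (lst1 : List (List (Int × List Int))) (lst2 : List (List (Int × List Int))) (dist : Int), Dom_intersect_two_pos_proximty lst1 lst2 dist → Pre_intersect_two_pos_proximty lst1 lst2 dist → Spec_intersect_two_pos_proximty lst1 lst2 dist (intersect_two_pos_proximty lst1 lst2 dist)

-- ===== LEMMAS AND PROOFS =====

-- A's inner position loop over v2, characterised.
theorem pvInner2_eq (k d x : Int) : ∀ (v2 a : List Int),
    v2.foldl (fun a y => if |x - y| ≤ d then (if k ∉ a then a ++ [k] else a) else a) a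
      = if k ∉ a ∧ v2.any (fun y => decide (|x - y| ≤ d)) then a ++ [k] else a := by
  intro v2
  induction v2 with
  | nil => intro a; simp
  | cons y ys ih =>
    intro a
    simp only [List.foldl_cons, List.any_cons, ih]
    by_cases h1 : |x - y| ≤ d
    · by_cases h2 : k ∈ a
      · simp [h1, h2]
      · simp [h1, h2]
    · simp [h1]

-- A's whole nested position loop, characterised.
theorem pvInnerA_eq (k d : Int) : ∀ (v1 v2 a : List Int),
    pvInnerA k d v1 v2 a
      = if k ∉ a ∧ v1.any (fun x => v2.any (fun y => decide (|x - y| ≤ d))) then a ++ [k] else a := by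
  intro v1
  induction v1 with
  | nil => intro v2 a; simp [pvInnerA]
  | cons x xs ih =>
    intro v2 a
    have hstep : pvInnerA k d (x :: xs) v2 a
        = pvInnerA k d xs v2
            (if k ∉ a ∧ v2.any (fun y => decide (|x - y| ≤ d)) then a ++ [k] else a) := by
      show List.foldl _ (List.foldl _ a v2) xs = _
      rw [pvInner2_eq k d x v2 a]
      rfl
    rw [hstep]
    by_cases h2 : k ∈ a
    · rw [if_neg (by simp [h2]), ih, if_neg (by simp [h2]), if_neg (by simp [h2])]
    · by_cases hc : v2.any (fun y => decide (|x - y| ≤ d)) = true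
      · rw [if_pos ⟨h2, hc⟩, ih, if_neg (by simp),
            if_pos ⟨h2, by simp [List.any_cons, hc]⟩]
      · rw [if_neg (fun h => hc h.2), ih]
        simp [List.any_cons, hc]

-- two-pointer sweep on sorted lists finds a pair within d iff one exists
theorem pvTwoPtr_spec : ∀ (n : Nat) (as bs : List Int) (d : Int),
    as.length + bs.length ≤ n → as.Pairwise (· ≤ ·) → bs.Pairwise (· ≤ ·) →
    (pvTwoPtr as bs d = true ↔ ∃ x ∈ as, ∃ y ∈ bs, |x - y| ≤ d) := by
  intro n
  induction n with
  | zero =>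
    intro as bs d hn _ _
    match as, bs with
    | [], _ => simp [pvTwoPtr]
    | _ :: _, _ => simp at hn
  | succ m ih =>
    intro as bs d hn ha hb
    match as, bs with
    | [], _ => simp [pvTwoPtr]
    | _ :: _, [] => simp [pvTwoPtr]
    | x :: xs, y :: ys =>
      rw [pvTwoPtr]
      rcases List.pairwise_cons.mp ha with ⟨hxall, hxs⟩
      rcases List.pairwise_cons.mp hb with ⟨hyall, hys⟩
      by_cases h1 : |x - y| ≤ d
      · simp only [h1, if_pos]
        constructor
        · intro _; exact ⟨x, by simp, y, by simp, h1⟩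
        · intro _; trivial
      · rw [if_neg h1]
        by_cases h2 : x < y
        · rw [if_pos h2]
          rw [ih xs (y :: ys) d (by simp at hn ⊢; omega) hxs hb]
          constructor
          · rintro ⟨a, hma, b, hmb, hab⟩; exact ⟨a, by simp [hma], b, hmb, hab⟩
          · rintro ⟨a, hma, b, hmb, hab⟩
            rcases List.mem_cons.mp hma with rfl | hma'
            · exfalso
              have hyb : y ≤ b := by
                rcases List.mem_cons.mp hmb with rfl | hb'
                · exact le_refl _
                · exact hyall b hb'
              rw [abs_le] at h1 hab
              omega
            · exact ⟨a, hma', b, hmb, hab⟩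
        · rw [if_neg h2]
          rw [ih (x :: xs) ys d (by simp at hn ⊢; omega) ha hys]
          constructor
          · rintro ⟨a, hma, b, hmb, hab⟩; exact ⟨a, hma, b, by simp [hmb], hab⟩
          · rintro ⟨a, hma, b, hmb, hab⟩
            rcases List.mem_cons.mp hmb with rfl | hmb'
            · exfalso
              have hxa : x ≤ a := by
                rcases List.mem_cons.mp hma with rfl | ha'
                · exact le_refl _
                · exact hxall a ha'
              rw [abs_le] at h1 hab
              omega
            · exact ⟨a, hma, b, hmb', hab⟩

theorem pvClose_eq (p1 p2 : List Int) (d : Int) :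
    pvClose p1 p2 d = p1.any (fun x => p2.any (fun y => decide (|x - y| ≤ d))) := by
  rw [Bool.eq_iff_iff]
  unfold pvClose
  rw [pvTwoPtr_spec ((PySem.List.sorted p1 (fun x => x) false).length + (PySem.List.sorted p2 (fun x => x) false).length) _ _ d le_rfl
      (PySem.List.sorted_pairwise p1 (fun x => x))
      (PySem.List.sorted_pairwise p2 (fun x => x))]
  simp [PySem.List.mem_sorted, List.any_eq_true]

-- A's merge loop equals a fold of B's dedup-filter step over B's merged triples.
theorem pvLoop_eq : ∀ (n : Nat) (l1 l2 : List (List (Int × List Int))) (d : Int) (ans : List Int),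
    l1.length + l2.length ≤ n →
    pvLoopA l1 l2 d ans
      = (pvMerge l1 l2).foldl
          (fun answer t => if t.1 ∉ answer ∧ pvClose t.2.1 t.2.2 d then answer ++ [t.1] else answer) ans := by
  intro n
  induction n with
  | zero =>
    intro l1 l2 d ans hn
    match l1, l2 with
    | [], _ => rw [pvLoopA, pvMerge]; rfl
    | _ :: _, _ => simp at hn
  | succ m ih =>
    intro l1 l2 d ans hn
    match l1, l2 with
    | [], _ => rw [pvLoopA, pvMerge]; rfl
    | _ :: _, [] => rw [pvLoopA, pvMerge]; rfl
    | d1 :: r1, d2 :: r2 =>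
      cases d1 with
      | nil => cases d2 with
        | nil => simp [pvLoopA, pvMerge]
        | cons h2 t2 => obtain ⟨k2, v2⟩ := h2; simp [pvLoopA, pvMerge]
      | cons h1 t1 =>
        obtain ⟨k1, v1⟩ := h1
        cases d2 with
        | nil => simp [pvLoopA, pvMerge]
        | cons h2 t2 =>
          obtain ⟨k2, v2⟩ := h2
          rw [pvLoopA, pvMerge]
          by_cases hk : k1 = k2
          · rw [if_pos hk, if_pos hk, List.foldl_cons,
                ih r1 r2 d _ (by simp at hn ⊢; omega), pvInnerA_eq, pvClose_eq]
          · rw [if_neg hk, if_neg hk]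
            by_cases hg : k1 > k2
            · rw [if_pos hg, if_pos hg, ih _ r2 d ans (by simp at hn ⊢; omega)]
            · rw [if_neg hg, if_neg hg, ih r1 _ d ans (by simp at hn ⊢; omega)]

-- ===== VERDICT (by name: the statement is the Claim_ definition above) =====
theorem intersect_two_pos_proximty_spec : Claim_equal_intersect_two_pos_proximty := by
  intro lst1 lst2 dist _ _
  unfold Spec_intersect_two_pos_proximty intersect_two_pos_proximty intersect_two_pos_proximty_alt
  exact pvLoop_eq (lst1.length + lst2.length) lst1 lst2 (dist + 1) [] le_rfl
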